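-- pv_equiv track=rewrite | github.com/cursiveinc/python | recorder/byuser.py | calculate_active_time_and_longest_session
-- ===== SOURCE A (Python) =====
-- def calculate_active_time_and_longest_session(events, idle_threshold=30000):
--     active_time = 0
--     longest_session = 0
--     current_session = 0
--     previous_timestamp = None
--
--     for event in sorted(events, key=lambda e: e['unixTimestamp']):
--         timestamp = int(event['unixTimestamp'])
--         if previous_timestamp is not None:
--             idle_time = timestamp - previous_timestamp
--             if idle_time <= idle_threshold:
--                 active_time += idle_time
--                 current_session += idle_time
--                 if current_session > longest_session:
--                     longest_session = current_session
--             else: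
--                 current_session = 0
--         previous_timestamp = timestamp
--
--     return active_time, longest_session
-- ===== SOURCE B (Python) =====
-- def calculate_active_time_and_longest_session(events, idle_threshold=30000):
--     timestamps = sorted(int(e['unixTimestamp']) for e in events)
--     # Group the sorted timestamps into sessions: maximal runs whose consecutive
--     # gaps stay within the threshold, kept as (first, last) interval endpoints.
--     sessions = []
--     for t in timestamps:
--         if sessions and t - sessions[-1][1] <= idle_threshold:
--             sessions[-1] = (sessions[-1][0], t)
--         else:
--             sessions.append((t, t))
--     spans = [last - first for first, last in sessions]
--     return sum(spans), max(spans, default=0)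
-- ===== Notes on version B (the rewrite author's own statement) =====
-- stated objective: alternative
-- what changed: B groups the sorted timestamps into whole session intervals (first,last), then reads active_time as the telescoped sum of the session spans and longest_session as the max span, instead of A's single stateful gap loop with running active/current/longest accumulators.
import Mathlib
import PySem

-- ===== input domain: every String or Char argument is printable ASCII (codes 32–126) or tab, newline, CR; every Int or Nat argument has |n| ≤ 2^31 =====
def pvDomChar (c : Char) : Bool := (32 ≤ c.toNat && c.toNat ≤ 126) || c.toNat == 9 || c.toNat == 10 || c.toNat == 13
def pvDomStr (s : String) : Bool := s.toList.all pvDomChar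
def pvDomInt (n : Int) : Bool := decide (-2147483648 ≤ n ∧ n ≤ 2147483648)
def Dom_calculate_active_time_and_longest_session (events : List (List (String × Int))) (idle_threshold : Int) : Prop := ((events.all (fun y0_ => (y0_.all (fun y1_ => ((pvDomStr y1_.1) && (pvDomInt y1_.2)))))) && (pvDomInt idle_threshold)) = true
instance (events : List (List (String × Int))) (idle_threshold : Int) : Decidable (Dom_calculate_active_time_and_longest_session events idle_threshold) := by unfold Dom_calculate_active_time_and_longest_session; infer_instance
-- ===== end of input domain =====

-- B groups the sorted timestamps into whole sessions (first,last) intervals and reads both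
-- answers off the session spans (telescoped sum and max); same O(n log n) cost, different algorithm.
-- ===== PORT A =====
-- e['unixTimestamp'] : first-match lookup in the association list; Pre_ guarantees the key is
-- present, so the getD default is never used.
def pvTs (e : List (String × Int)) : Int := (List.lookup "unixTimestamp" e).getD 0

def calculate_active_time_and_longest_session (events : List (List (String × Int))) (idle_threshold : Int) : Int × Int :=
  let res := (PySem.List.sorted events pvTs false).foldl
    (fun (st : Int × Int × Int × Option Int) event =>
      let (active_time, longest_session, current_session, previous_timestamp) := st
      let timestamp := pvTs event
      match previous_timestamp with
      | some prev =>
          let idle_time := timestamp - prev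
          if idle_time ≤ idle_threshold then
            let current' := current_session + idle_time
            let longest' := if current' > longest_session then current' else longest_session
            (active_time + idle_time, longest', current', some timestamp)
          else
            (active_time, longest_session, 0, some timestamp)
      | none => (active_time, longest_session, current_session, some timestamp))
    (0, 0, 0, none)
  (res.1, res.2.1)

-- ===== PORT B =====
-- 'if sessions and t - sessions[-1][1] <= idle_threshold: sessions[-1] = (sessions[-1][0], t)
--  else: sessions.append((t, t))' — recursion to the last element of the session list.
def pvAddTs (idle_threshold t : Int) : List (Int × Int) → List (Int × Int)
  | [] => [(t, t)]
  | (a, b) :: rest =>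
    match rest with
    | [] => if t - b ≤ idle_threshold then [(a, t)] else [(a, b), (t, t)]
    | _ :: _ => (a, b) :: pvAddTs idle_threshold t rest

def calculate_active_time_and_longest_session_alt (events : List (List (String × Int))) (idle_threshold : Int) : Int × Int :=
  let timestamps := PySem.List.sorted (events.map pvTs) (fun x => x) false
  let sessions := timestamps.foldl (fun ss t => pvAddTs idle_threshold t ss) []
  let spans := sessions.map (fun p => p.2 - p.1)
  (spans.sum, PySem.List.maxD spans (fun x => x) 0)

-- ===== PRECONDITION & SPEC =====
-- Pre_ excludes exactly the inputs where some event lacks the 'unixTimestamp' key, on which A raises KeyError.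
def Pre_calculate_active_time_and_longest_session (events : List (List (String × Int))) (idle_threshold : Int) : Prop :=
  (events.all (fun e => (List.lookup "unixTimestamp" e).isSome)) = true
instance (events : List (List (String × Int))) (idle_threshold : Int) : Decidable (Pre_calculate_active_time_and_longest_session events idle_threshold) := by unfold Pre_calculate_active_time_and_longest_session; infer_instance

def pvWitness_calculate_active_time_and_longest_session : (List (List (String × Int))) × Int :=
  ([[("unixTimestamp", 3)], [("unixTimestamp", 1)], [("unixTimestamp", 40000)]], 30000)

def Spec_calculate_active_time_and_longest_session (events : List (List (String × Int))) (idle_threshold : Int) (out : Int × Int) : Prop := out = calculate_active_time_and_longest_session_alt events idle_threshold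
instance (events : List (List (String × Int))) (idle_threshold : Int) (out : Int × Int) : Decidable (Spec_calculate_active_time_and_longest_session events idle_threshold out) := by unfold Spec_calculate_active_time_and_longest_session; infer_instance

-- ===== CLAIM (what is proved, stated in full; the proofs are below) =====
def Claim_equal_calculate_active_time_and_longest_session : Prop := ∀ (events : List (List (String × Int))) (idle_threshold : Int), Dom_calculate_active_time_and_longest_session events idle_threshold → Pre_calculate_active_time_and_longest_session events idle_threshold → Spec_calculate_active_time_and_longest_session events idle_threshold (calculate_active_time_and_longest_session events idle_threshold)

-- ===== LEMMAS AND PROOFS =====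

-- A's loop step, over the already-extracted timestamp
def stepA (th : Int) (st : Int × Int × Int × Option Int) (timestamp : Int) : Int × Int × Int × Option Int :=
  let (active_time, longest_session, current_session, previous_timestamp) := st
  match previous_timestamp with
  | some prev =>
      let idle_time := timestamp - prev
      if idle_time ≤ th then
        let current' := current_session + idle_time
        let longest' := if current' > longest_session then current' else longest_session
        (active_time + idle_time, longest', current', some timestamp)
      else
        (active_time, longest_session, 0, some timestamp)
  | none => (active_time, longest_session, current_session, some timestamp)

-- the session intervals of p :: ts (previous timestamp p, current session started at s)
def buildSessions (th : Int) : Int → Int → List Int → List (Int × Int)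
  | s, p, [] => [(s, p)]
  | s, p, t :: r => if t - p ≤ th then buildSessions th s t r else (s, p) :: buildSessions th t t r

def sumSpans (ss : List (Int × Int)) : Int := (ss.map (fun q => q.2 - q.1)).sum
def maxSpans (ss : List (Int × Int)) : Int := (ss.map (fun q => q.2 - q.1)).foldr max 0

-- A's foldl over events equals the stepA foldl over the extracted timestamps
theorem foldA_eq (th : Int) (l : List (List (String × Int))) (init : Int × Int × Int × Option Int) :
    l.foldl
      (fun (st : Int × Int × Int × Option Int) event =>
        let (active_time, longest_session, current_session, previous_timestamp) := st
        let timestamp := pvTs event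
        match previous_timestamp with
        | some prev =>
            let idle_time := timestamp - prev
            if idle_time ≤ th then
              let current' := current_session + idle_time
              let longest' := if current' > longest_session then current' else longest_session
              (active_time + idle_time, longest', current', some timestamp)
            else
              (active_time, longest_session, 0, some timestamp)
        | none => (active_time, longest_session, current_session, some timestamp))
      init = (l.map pvTs).foldl (stepA th) init := by
  rw [List.foldl_map]
  rfl

-- the two sorts agree: timestamps of the key-sorted events = id-sort of the timestamps
theorem map_sorted_eq (events : List (List (String × Int))) :
    (PySem.List.sorted events pvTs false).map pvTs
      = PySem.List.sorted (events.map pvTs) (fun x => x) false := by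
  exact (PySem.List.sorted_id_eq_of_perm_of_pairwise _ _
    ((PySem.List.sorted_perm events pvTs false).map pvTs)
    (PySem.List.sorted_map_key_pairwise events pvTs)).symm

theorem addTs_append (th t : Int) (front : List (Int × Int)) (q : Int × Int) :
    pvAddTs th t (front ++ [q]) = front ++ pvAddTs th t [q] := by
  induction front with
  | nil => rfl
  | cons x xs ih =>
    obtain ⟨a, b⟩ := x
    have key : pvAddTs th t ((a, b) :: (xs ++ [q])) = (a, b) :: pvAddTs th t (xs ++ [q]) := by
      cases hx : xs ++ [q] with
      | nil => exact absurd hx (by simp)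
      | cons y ys => rfl
    rw [List.cons_append, key, ih, List.cons_append]

theorem foldB_eq (th : Int) (ts : List Int) : ∀ (front : List (Int × Int)) (s p : Int),
    ts.foldl (fun ss t => pvAddTs th t ss) (front ++ [(s, p)])
      = front ++ buildSessions th s p ts := by
  induction ts with
  | nil => intro front s p; rfl
  | cons t r ih =>
    intro front s p
    by_cases h : t - p ≤ th
    · simp only [List.foldl_cons, buildSessions, if_pos h]
      rw [addTs_append, show pvAddTs th t [(s, p)] = [(s, t)] from by simp [pvAddTs, h], ih]
    · simp only [List.foldl_cons, buildSessions, if_neg h]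
      rw [addTs_append, show pvAddTs th t [(s, p)] = [(s, p), (t, t)] from by simp [pvAddTs, h],
        show front ++ [(s, p), (t, t)] = (front ++ [(s, p)]) ++ [(t, t)] by simp, ih]
      simp

theorem maxSpans_nonneg (ss : List (Int × Int)) : 0 ≤ maxSpans ss := by
  unfold maxSpans
  induction ss.map (fun q => q.2 - q.1) with
  | nil => simp
  | cons x r ih => simp only [List.foldr_cons]; omega

theorem span_le_maxSpans (th : Int) (ts : List Int) : ∀ (s p : Int),
    List.Pairwise (· ≤ ·) (p :: ts) → p - s ≤ maxSpans (buildSessions th s p ts) := by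
  induction ts with
  | nil => intro s p _; simp [buildSessions, maxSpans]
  | cons t r ih =>
    intro s p hch
    have hpt : p ≤ t := (List.pairwise_cons.mp hch).1 t List.mem_cons_self
    have hch' : List.Pairwise (· ≤ ·) (t :: r) := (List.pairwise_cons.mp hch).2
    by_cases h : t - p ≤ th
    · simp only [buildSessions, if_pos h]
      have := ih s t hch'
      omega
    · simp only [buildSessions, if_neg h, maxSpans, List.map_cons, List.foldr_cons]
      have := maxSpans_nonneg (buildSessions th t t r)
      unfold maxSpans at this
      omega

theorem spans_nonneg (th : Int) (ts : List Int) : ∀ (s p : Int), s ≤ p →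
    List.Pairwise (· ≤ ·) (p :: ts) →
    ∀ q ∈ buildSessions th s p ts, q.1 ≤ q.2 := by
  induction ts with
  | nil => intro s p hsp _ q hq; simp [buildSessions] at hq; subst hq; exact hsp
  | cons t r ih =>
    intro s p hsp hch q hq
    have hpt : p ≤ t := (List.pairwise_cons.mp hch).1 t List.mem_cons_self
    have hch' : List.Pairwise (· ≤ ·) (t :: r) := (List.pairwise_cons.mp hch).2
    by_cases h : t - p ≤ th
    · simp only [buildSessions, if_pos h] at hq
      exact ih s t (by omega) hch' q hq
    · simp only [buildSessions, if_neg h, List.mem_cons] at hq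
      rcases hq with hq | hq
      · subst hq; exact hsp
      · exact ih t t le_rfl hch' q hq

-- A's fold from a mid-loop state reads off the sessions it is about to close
theorem main_lemma (th : Int) (ts : List Int) : ∀ (p a l c : Int),
    List.Pairwise (· ≤ ·) (p :: ts) → 0 ≤ c → c ≤ l →
    (ts.foldl (stepA th) (a, l, c, some p)).1
        = a + (sumSpans (buildSessions th (p - c) p ts) - c) ∧
    (ts.foldl (stepA th) (a, l, c, some p)).2.1
        = max l (maxSpans (buildSessions th (p - c) p ts)) := by
  induction ts with
  | nil =>
    intro p a l c _ hc hl
    simp only [List.foldl_nil, buildSessions, sumSpans, maxSpans, List.map_cons,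
      List.map_nil, List.sum_cons, List.sum_nil, List.foldr_cons, List.foldr_nil]
    constructor
    · ring_nf
    · omega
  | cons t r ih =>
    intro p a l c hch hc hl
    have hpt : p ≤ t := (List.pairwise_cons.mp hch).1 t List.mem_cons_self
    have hch' : List.Pairwise (· ≤ ·) (t :: r) := (List.pairwise_cons.mp hch).2
    by_cases h : t - p ≤ th
    · have hstep : stepA th (a, l, c, some p) t
          = (a + (t - p), if c + (t - p) > l then c + (t - p) else l, c + (t - p), some t) := by
        simp [stepA, h]
      have hl' : c + (t - p) ≤ if c + (t - p) > l then c + (t - p) else l := by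
        split <;> omega
      have hc' : 0 ≤ c + (t - p) := by omega
      have ihh := ih t (a + (t - p)) _ (c + (t - p)) hch' hc' hl'
      have hbs : buildSessions th (p - c) p (t :: r)
          = buildSessions th (t - (c + (t - p))) t r := by
        simp only [buildSessions, if_pos h]
        congr 1
        ring
      have hspan : c + (t - p) ≤ maxSpans (buildSessions th (t - (c + (t - p))) t r) := by
        have := span_le_maxSpans th r (t - (c + (t - p))) t hch'
        omega
      simp only [List.foldl_cons, hstep, hbs]
      constructor
      · rw [ihh.1]; ring
      · rw [ihh.2]
        by_cases hcl : c + (t - p) > l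
        · rw [if_pos hcl]; omega
        · rw [if_neg hcl]
    · have hstep : stepA th (a, l, c, some p) t = (a, l, 0, some t) := by
        simp [stepA, h]
      have ihh := ih t a l 0 hch' le_rfl (by omega)
      have hbs : buildSessions th (p - c) p (t :: r)
          = (p - c, p) :: buildSessions th (t - 0) t r := by
        simp only [buildSessions, if_neg h]
        norm_num
      simp only [List.foldl_cons, hstep, hbs]
      simp only [sumSpans, maxSpans, List.map_cons, List.sum_cons, List.foldr_cons] at *
      constructor
      · rw [ihh.1]; ring
      · rw [ihh.2]; omega

-- max(spans, default=0) over nonnegative spans is the foldr-max-0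
theorem foldl_max_eq_foldr (t : List Int) : ∀ (x d : Int), d ≤ x →
    t.foldl max x = (x :: t).foldr max d := by
  induction t with
  | nil => intro x d h; simp only [List.foldl_nil, List.foldr_cons, List.foldr_nil]; omega
  | cons y r ih =>
    intro x d h
    simp only [List.foldl_cons, List.foldr_cons]
    rw [ih (max x y) d (le_trans h (le_max_left _ _))]
    simp only [List.foldr_cons]
    omega

theorem maxD_eq_maxSpans (ss : List (Int × Int)) (h : ∀ q ∈ ss, q.1 ≤ q.2) :
    PySem.List.maxD (ss.map (fun p => p.2 - p.1)) (fun x => x) 0 = maxSpans ss := by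
  unfold maxSpans
  cases hm : ss.map (fun p => p.2 - p.1) with
  | nil => rfl
  | cons x t =>
    have hx : 0 ≤ x := by
      have : x ∈ ss.map (fun p => p.2 - p.1) := by rw [hm]; exact List.mem_cons_self
      obtain ⟨q, hq, rfl⟩ := List.mem_map.mp this
      have := h q hq; omega
    simp only [PySem.List.maxD, PySem.List.max?_id_cons, Option.getD_some]
    exact foldl_max_eq_foldr t x 0 hx

theorem calculate_active_time_and_longest_session_spec : Claim_equal_calculate_active_time_and_longest_session := by
  intro events th _ _
  unfold Spec_calculate_active_time_and_longest_session
  unfold calculate_active_time_and_longest_session calculate_active_time_and_longest_session_alt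
  dsimp only
  rw [foldA_eq th, ← map_sorted_eq events]
  have hsorted : List.Pairwise (· ≤ ·) ((PySem.List.sorted events pvTs false).map pvTs) :=
    PySem.List.sorted_map_key_pairwise events pvTs
  cases hts : (PySem.List.sorted events pvTs false).map pvTs with
  | nil => exact Prod.ext (by simp) rfl
  | cons t rest =>
    rw [hts] at hsorted
    have hm := main_lemma th rest t 0 0 0 hsorted le_rfl le_rfl
    have hsess : (t :: rest).foldl (fun ss u => pvAddTs th u ss) []
        = buildSessions th t t rest := by
      have h0 : pvAddTs th t ([] : List (Int × Int)) = [] ++ [(t, t)] := rfl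
      rw [List.foldl_cons, h0, foldB_eq th rest [] t t, List.nil_append]
    simp only [List.foldl_cons, hsess]
    have hstep : stepA th (0, 0, 0, none) t = (0, 0, 0, some t) := rfl
    rw [hstep]
    have hbz : buildSessions th (t - 0) t rest = buildSessions th t t rest := by norm_num
    rw [hbz] at hm
    have hnn := spans_nonneg th rest t t le_rfl hsorted
    rw [Prod.mk.injEq]
    constructor
    · rw [hm.1]; unfold sumSpans; ring
    · rw [hm.2, maxD_eq_maxSpans _ hnn]
      have := maxSpans_nonneg (buildSessions th t t rest)
      omega
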